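-- pv_equiv track=rewrite | github.com/WentseChen/mappo | onpolicy/envs/mujoco/navigation_fix.py | _find_mode_cnt
-- ===== SOURCE A (Python) =====
-- def _find_mode_cnt(the_list):
--     # generated by chat-gpt
--
--     num_counts = {}  # Dictionary to store counts of each number
--
--     # Count occurrences of each number
--     for num in the_list:
--         if num in num_counts:
--             num_counts[num] += 1
--         else:
--             num_counts[num] = 1
--
--     # Find the maximum count
--     max_count = max(num_counts.values())
--
--     return max_count
-- ===== SOURCE B (Python) =====
-- def _find_mode_cnt(the_list):
--     # B: rescan strategy — count each distinct value with list.count, take the max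
--     return max(the_list.count(x) for x in set(the_list))
-- ===== Notes on version B (the rewrite author's own statement) =====
-- stated objective: simpler
-- what changed: Replaces the dictionary-accumulation pass with a nested rescan: build the set of distinct values and take the max of the_list.count(x) over it.
import Mathlib
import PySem

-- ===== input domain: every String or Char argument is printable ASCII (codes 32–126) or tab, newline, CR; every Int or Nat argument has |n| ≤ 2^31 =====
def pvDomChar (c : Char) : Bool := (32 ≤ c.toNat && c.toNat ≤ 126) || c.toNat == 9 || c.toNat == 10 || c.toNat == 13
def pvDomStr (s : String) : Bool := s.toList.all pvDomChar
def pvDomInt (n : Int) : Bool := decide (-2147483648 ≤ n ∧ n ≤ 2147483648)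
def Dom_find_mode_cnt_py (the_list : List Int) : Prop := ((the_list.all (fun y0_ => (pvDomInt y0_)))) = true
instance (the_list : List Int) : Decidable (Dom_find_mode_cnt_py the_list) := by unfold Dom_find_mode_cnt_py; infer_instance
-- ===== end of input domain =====

-- B replaces A's dictionary-accumulation pass with building the set of distinct
-- values and rescanning the list with count for each (simpler, not faster).


-- ===== PORT A =====
-- the counting loop: if num in num_counts: num_counts[num] += 1 else: num_counts[num] = 1
def find_mode_cnt_py (the_list : List Int) : Int :=
  let num_counts : PySem.Dict Int Int :=
    the_list.foldl
      (fun d num => if d.contains num then d.modify num 0 (· + 1) else d.insert num 1)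
      PySem.Dict.empty
  -- max(num_counts.values()); raises ValueError on an empty dict — excluded by Pre_
  (PySem.List.max? num_counts.values (fun v => v)).getD 0

-- ===== PORT B =====
-- max(the_list.count(x) for x in set(the_list)); empty max excluded by Pre_
def find_mode_cnt_py_alt (the_list : List Int) : Int :=
  (PySem.List.max?
      ((PySem.Set.ofList the_list).map (fun x => (PySem.List.count the_list x : Int)))
      (fun v => v)).getD 0

-- ===== PRECONDITION & SPEC =====
-- Pre_ excludes only the empty list, on which Python A raises ValueError (max of an empty sequence).
def Pre_find_mode_cnt_py (the_list : List Int) : Prop := the_list ≠ []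
instance (the_list : List Int) : Decidable (Pre_find_mode_cnt_py the_list) := by unfold Pre_find_mode_cnt_py; infer_instance
def pvWitness_find_mode_cnt_py : List Int := [1, 2, 2]

def Spec_find_mode_cnt_py (the_list : List Int) (out : Int) : Prop := out = find_mode_cnt_py_alt the_list
instance (the_list : List Int) (out : Int) : Decidable (Spec_find_mode_cnt_py the_list out) := by unfold Spec_find_mode_cnt_py; infer_instance

-- ===== CLAIM (what is proved, stated in full; the proofs are below) =====
def Claim_equal_find_mode_cnt_py : Prop := ∀ (the_list : List Int), Dom_find_mode_cnt_py the_list → Pre_find_mode_cnt_py the_list → Spec_find_mode_cnt_py the_list (find_mode_cnt_py the_list)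

-- ===== LEMMAS AND PROOFS =====

-- A's loop body is Counter's step: insert on a missing key is modify with default 0.
lemma step_eq_counter_step (d : PySem.Dict Int Int) (x : Int) :
    (if d.contains x then d.modify x 0 (· + 1) else d.insert x 1) = d.modify x 0 (· + 1) := by
  by_cases h : d.contains x
  · simp [h]
  · rw [Bool.not_eq_true] at h
    have hg : d.get? x = none := by rw [PySem.Dict.get?_eq_none_iff_contains, h]
    have hg0 : d.getD x 0 = 0 := by simp [PySem.Dict.getD, hg]
    simp [h, PySem.Dict.insert, PySem.Dict.modify, PySem.Dict.contains, hg0] at *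

lemma dict_eq_counter (the_list : List Int) :
    the_list.foldl
      (fun d num => if d.contains num then d.modify num 0 (· + 1) else d.insert num 1)
      PySem.Dict.empty = PySem.Dict.counter the_list := by
  rw [PySem.Dict.counter_eq_foldl]
  apply List.foldl_ext
  intro d x _
  exact step_eq_counter_step d x

lemma values_counter_eq (xs : List Int) :
    (PySem.Dict.counter xs).values
      = (PySem.Set.ofList xs).map (fun x => (PySem.List.count xs x : Int)) := by
  simp [PySem.Dict.values, PySem.Dict.items_counter, List.map_map, PySem.List.count]

-- ===== VERDICT (by name: the statement is the Claim_ definition above) =====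
theorem find_mode_cnt_py_spec : Claim_equal_find_mode_cnt_py := by
  intro xs _ _
  unfold Spec_find_mode_cnt_py find_mode_cnt_py find_mode_cnt_py_alt
  simp only [dict_eq_counter, values_counter_eq]
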